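-- pv_equiv track=rewrite | github.com/djotaku/adventofcode | 2020/Day_23/solution_1.py | obtain_final_solution
-- ===== SOURCE A (Python) =====
-- from collections import deque
--
-- def obtain_final_solution(game_session):
--     game_session_deque = deque(game_session)
--     while game_session_deque[0] != 1:
--         game_session_deque.rotate()
--     let_us_make_a_string_part_1 = list(game_session_deque)
--     let_us_make_a_string_part_2 = let_us_make_a_string_part_1[1:]
--     let_us_make_a_string_part_3 = [str(number) for number in let_us_make_a_string_part_2]
--     return ''.join(let_us_make_a_string_part_3)
-- ===== SOURCE B (Python) =====
-- def obtain_final_solution(game_session):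
--     # rotating right stops at the last occurrence of 1, unless 1 already leads
--     if game_session[0] == 1:
--         idx = 0
--     else:
--         idx = len(game_session) - 1 - game_session[::-1].index(1)
--     return ''.join(str(x) for x in game_session[idx + 1:] + game_session[:idx])
-- ===== Notes on version B (the rewrite author's own statement) =====
-- stated objective: simpler
-- what changed: Replaces the deque and the one-step-at-a-time rotation loop by computing the rotation's stopping point directly (0 if 1 already leads, else the position of the last 1) and returning the slice after it concatenated with the slice before it.
import Mathlib
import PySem

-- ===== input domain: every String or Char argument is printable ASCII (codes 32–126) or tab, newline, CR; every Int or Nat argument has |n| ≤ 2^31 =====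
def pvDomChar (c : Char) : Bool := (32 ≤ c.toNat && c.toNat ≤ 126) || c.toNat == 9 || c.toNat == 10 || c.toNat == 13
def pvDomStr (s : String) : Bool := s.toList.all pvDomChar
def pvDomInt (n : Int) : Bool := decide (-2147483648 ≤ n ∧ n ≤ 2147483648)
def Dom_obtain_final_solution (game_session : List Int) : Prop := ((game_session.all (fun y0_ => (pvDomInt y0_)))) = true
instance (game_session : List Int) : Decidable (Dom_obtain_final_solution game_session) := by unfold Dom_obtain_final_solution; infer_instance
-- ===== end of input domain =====

-- B replaces A's deque-rotation loop by an index lookup of 1 and slice concatenation (simpler, one pass).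

-- ===== PORT A =====
-- deque.rotate(): move the last element to the front (identity on []).
def pvRotate (l : List Int) : List Int :=
  l.drop (l.length - 1) ++ l.take (l.length - 1)

-- 'while game_session_deque[0] != 1: rotate()' — fuel-bounded; inside Pre_ the fuel
-- length+1 always suffices (proved below), outside Pre_ the Python loop raises or diverges.
def pvLoopA : Nat → List Int → List Int
  | 0, l => l
  | f + 1, l => if l.head? = some 1 then l else pvLoopA f (pvRotate l)

def obtain_final_solution (game_session : List Int) : String :=
  let rotated := pvLoopA (game_session.length + 1) game_session
  PySem.Str.join "" ((rotated.drop 1).map (fun n => PySem.Int.toStr n))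

-- ===== PORT B =====
def obtain_final_solution_alt (game_session : List Int) : String :=
  match game_session with
  | [] => ""   -- Python B raises IndexError here; outside Pre_
  | x :: _ =>
      let idx : Nat :=
        if x = 1 then 0
        else
          match PySem.List.index? game_session.reverse 1 with
          | none => 0   -- Python B raises ValueError here; outside Pre_
          | some j => game_session.length - 1 - j
      PySem.Str.join ""
        ((PySem.List.slice game_session (some ((idx : Int) + 1)) none
          ++ PySem.List.slice game_session none (some (idx : Int))).map
          (fun n => PySem.Int.toStr n))

-- ===== PRECONDITION & SPEC =====
-- Pre_ excludes only lists with no 1: on the empty list A raises IndexError, on any other such list its loop never terminates.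
def Pre_obtain_final_solution (game_session : List Int) : Prop :=
  (1 : Int) ∈ game_session
instance (game_session : List Int) : Decidable (Pre_obtain_final_solution game_session) := by
  unfold Pre_obtain_final_solution; infer_instance

def pvWitness_obtain_final_solution : List Int := [3, 1, 2]

def Spec_obtain_final_solution (game_session : List Int) (out : String) : Prop := out = obtain_final_solution_alt game_session
instance (game_session : List Int) (out : String) : Decidable (Spec_obtain_final_solution game_session out) := by unfold Spec_obtain_final_solution; infer_instance

-- ===== CLAIM (what is proved, stated in full; the proofs are below) =====
def Claim_equal_obtain_final_solution : Prop := ∀ (game_session : List Int), Dom_obtain_final_solution game_session → Pre_obtain_final_solution game_session → Spec_obtain_final_solution game_session (obtain_final_solution game_session)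

-- ===== LEMMAS AND PROOFS =====

lemma pvRotate_append (l : List Int) (a : Int) : pvRotate (l ++ [a]) = a :: l := by
  simp [pvRotate]

lemma pvLoopA_stop (f : Nat) (hf : 1 ≤ f) (t : List Int) :
    pvLoopA f (1 :: t) = 1 :: t := by
  obtain ⟨g, rfl⟩ : ∃ g, f = g + 1 := ⟨f - 1, by omega⟩
  simp [pvLoopA]

lemma pvLoopA_cons_ne (g : Nat) (x : Int) (t : List Int) (hx : x ≠ 1) :
    pvLoopA (g + 1) (x :: t) = pvLoopA g (pvRotate (x :: t)) := by
  simp [pvLoopA, hx]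

-- the rotation loop lands on the splitting point 'last 1' (1 ∉ ys) provided it does not
-- stop at once (the head is not 1)
lemma pvLoopA_reaches (ys : List Int) : ∀ (xs : List Int) (f : Nat),
    xs.head? ≠ some 1 → (1 : Int) ∉ ys → ys.length + 2 ≤ f →
    pvLoopA f (xs ++ 1 :: ys) = 1 :: (ys ++ xs) := by
  induction ys using List.reverseRecOn with
  | nil =>
      intro xs f hxs _ hf
      cases xs with
      | nil => simpa using pvLoopA_stop f (by omega) []
      | cons x xs' =>
          obtain ⟨g, rfl⟩ : ∃ g, f = g + 1 := ⟨f - 1, by omega⟩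
          have hx1 : x ≠ 1 := fun h => hxs (by simp [h])
          rw [List.cons_append, pvLoopA_cons_ne g x _ hx1, ← List.cons_append,
            pvRotate_append (x :: xs') 1, pvLoopA_stop g (by omega)]
          simp
  | append_singleton zs a ih =>
      intro xs f hxs hys hf
      have ha : a ≠ 1 := fun h => hys (by simp [h])
      have hzs : (1 : Int) ∉ zs := fun h => hys (by simp [h])
      cases xs with
      | nil => simpa using pvLoopA_stop f (by omega) (zs ++ [a])
      | cons x xs' =>
          obtain ⟨g, rfl⟩ : ∃ g, f = g + 1 := ⟨f - 1, by omega⟩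
          have hx1 : x ≠ 1 := fun h => hxs (by simp [h])
          rw [List.cons_append, pvLoopA_cons_ne g x _ hx1, ← List.cons_append,
            show (x :: xs') ++ 1 :: (zs ++ [a]) = ((x :: xs') ++ 1 :: zs) ++ [a] by simp,
            pvRotate_append _ a]
          have h1a : (a :: x :: xs').head? ≠ some 1 := by simpa using ha
          have hih := ih (a :: x :: xs') g h1a hzs (by simp at hf ⊢; omega)
          rw [List.cons_append] at hih
          rw [hih]
          simp

-- both sides reduced to 'join (map toStr (suf ++ pre))', given the split l = pre ++ 1 :: suf
lemma pv_main (pre suf : List Int) (hhead : pre.head? ≠ some 1)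
    (hsuf1 : (1 : Int) ∉ suf) (idx : Nat) (hidx : idx = pre.length) :
    PySem.Str.join ""
        (((pvLoopA ((pre ++ 1 :: suf).length + 1) (pre ++ 1 :: suf)).drop 1).map
          (fun n => PySem.Int.toStr n))
      = PySem.Str.join ""
        ((PySem.List.slice (pre ++ 1 :: suf) (some ((idx : Int) + 1)) none
            ++ PySem.List.slice (pre ++ 1 :: suf) none (some (idx : Int))).map
          (fun n => PySem.Int.toStr n)) := by
  subst hidx
  have hA := pvLoopA_reaches suf pre ((pre ++ 1 :: suf).length + 1) hhead hsuf1 (by simp)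
  have hslice1 : PySem.List.slice (pre ++ 1 :: suf) (some ((pre.length : Int) + 1)) none
      = suf := by
    rw [show ((pre.length : Int) + 1) = ((pre.length + 1 : Nat) : Int) by push_cast; ring,
      PySem.List.slice_from_natCast]
    simp
  have hslice2 : PySem.List.slice (pre ++ 1 :: suf) none (some ((pre.length : Int)))
      = pre := by
    rw [PySem.List.slice_to_natCast]
    simp
  rw [hA, hslice1, hslice2]
  rfl

-- ===== VERDICT (by name: the statement is the Claim_ definition above) =====

theorem obtain_final_solution_spec : Claim_equal_obtain_final_solution := by
  intro l _ hpre
  unfold Pre_obtain_final_solution at hpre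
  unfold Spec_obtain_final_solution
  cases l with
  | nil => simp at hpre
  | cons x t =>
      by_cases hx : x = 1
      · -- 1 already leads: the loop stops at once, B takes idx = 0
        subst hx
        unfold obtain_final_solution obtain_final_solution_alt
        show PySem.Str.join ""
            (((pvLoopA ((1 :: t).length + 1) (1 :: t)).drop 1).map
              (fun n => PySem.Int.toStr n))
          = PySem.Str.join ""
            ((PySem.List.slice (1 :: t) (some (((0 : Nat) : Int) + 1)) none
                ++ PySem.List.slice (1 :: t) none (some ((0 : Nat) : Int))).map
              (fun n => PySem.Int.toStr n))
        rw [pvLoopA_stop _ (by omega),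
          show (((0 : Nat) : Int) + 1) = ((1 : Nat) : Int) by norm_num,
          PySem.List.slice_from_natCast, PySem.List.slice_to_natCast]
        simp
      · -- head ≠ 1: split at the LAST occurrence of 1 via the reversed index
        have hmemr : (1 : Int) ∈ (x :: t).reverse := List.mem_reverse.mpr hpre
        obtain ⟨j, hj⟩ := Option.isSome_iff_exists.mp
          ((PySem.List.index?_isSome_iff (x :: t).reverse 1).mpr hmemr)
        obtain ⟨rp, rs, hrev, hlen, hrp1⟩ :=
          (PySem.List.index?_eq_some_iff (x :: t).reverse 1 j).mp hj
        have hl : x :: t = rs.reverse ++ 1 :: rp.reverse := by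
          have := congrArg List.reverse hrev
          simpa using this
        have hhead : rs.reverse.head? ≠ some 1 := by
          intro hc
          have h1 : (rs.reverse ++ 1 :: rp.reverse).head? = some 1 := by
            rw [List.head?_append, hc]
            rfl
          rw [← hl] at h1
          simp at h1
          exact hx h1
        have hsuf1 : (1 : Int) ∉ rp.reverse := by simpa using hrp1
        have hidx : (x :: t).length - 1 - j = rs.reverse.length := by
          have h1 := congrArg List.length hrev
          simp at h1
          rw [List.length_reverse]
          simp only [List.length_cons]
          omega
        unfold obtain_final_solution obtain_final_solution_alt
        show PySem.Str.join ""
            (((pvLoopA ((x :: t).length + 1) (x :: t)).drop 1).map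
              (fun n => PySem.Int.toStr n))
          = PySem.Str.join ""
            ((PySem.List.slice (x :: t)
                (some (((if x = 1 then 0
                  else match PySem.List.index? (x :: t).reverse 1 with
                       | none => 0
                       | some j => (x :: t).length - 1 - j : Nat) : Int) + 1)) none
              ++ PySem.List.slice (x :: t) none
                (some ((if x = 1 then 0
                  else match PySem.List.index? (x :: t).reverse 1 with
                       | none => 0
                       | some j => (x :: t).length - 1 - j : Nat) : Int))).map
              (fun n => PySem.Int.toStr n))
        rw [if_neg hx, hj]
        have hlen2 := congrArg List.length hl
        rw [hl]
        exact pv_main rs.reverse rp.reverse hhead hsuf1 _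
          (by show (rs.reverse ++ 1 :: rp.reverse).length - 1 - j = rs.reverse.length
              rw [← hlen2]
              exact hidx)
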